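-- pv_equiv track=rewrite | github.com/vbsilva/Algoritimos_2016.1 | 2016.1/Python/L7.py | backtrack
-- ===== SOURCE A (Python) =====
-- def backtrack(A, Q, i, p, M, qtd, L):
--     if p > Q or qtd + (L - qtd) < M:
--         return 0
--     if i == L:
--         if p <= Q and qtd >= M:
--             return 1
--         return 0
--     retorno = backtrack(A, Q, i + 1, p, M, qtd, L)
--     retorno += backtrack(A, Q, i + 1, p + int(A[i]), M, qtd + 1, L)
--     return retorno
-- ===== SOURCE B (Python) =====
-- def backtrack(A, Q, i, p, M, qtd, L):
--     # Level-by-level DP: a dict maps each reachable (weight, count) state to the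
--     # number of ways to reach it (only states with weight <= Q are ever kept).
--     if p > Q or L < M:
--         return 0
--     states = {(p, qtd): 1}
--     for j in range(i, L):
--         w = int(A[j])
--         nxt = {}
--         for (pp, c), n in states.items():
--             # skip item j
--             nxt[(pp, c)] = nxt.get((pp, c), 0) + n
--             # take item j (pruned exactly like A's weight check)
--             if pp + w <= Q:
--                 key = (pp + w, c + 1)
--                 nxt[key] = nxt.get(key, 0) + n
--         states = nxt
--     return sum(n for (pp, c), n in states.items() if c >= M)
-- ===== Notes on version B (the rewrite author's own statement) =====
-- stated objective: alternative
-- what changed: Replaced the branch-and-bound recursion by an iterative level-order DP that keeps a dictionary from (weight, count) states to multiplicities, merging equal states at each item, and sums the multiplicities of states with count >= M at the end.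
-- crash fix: On inputs with i > L, p <= Q and M <= L, A never reaches its base case and raises RecursionError, while B's empty item range simply returns 1 if qtd >= M else 0. — e.g. on backtrack([], 0, 5, 0, 0, 0, 3): A raises RecursionError, B returns 1
import Mathlib
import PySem

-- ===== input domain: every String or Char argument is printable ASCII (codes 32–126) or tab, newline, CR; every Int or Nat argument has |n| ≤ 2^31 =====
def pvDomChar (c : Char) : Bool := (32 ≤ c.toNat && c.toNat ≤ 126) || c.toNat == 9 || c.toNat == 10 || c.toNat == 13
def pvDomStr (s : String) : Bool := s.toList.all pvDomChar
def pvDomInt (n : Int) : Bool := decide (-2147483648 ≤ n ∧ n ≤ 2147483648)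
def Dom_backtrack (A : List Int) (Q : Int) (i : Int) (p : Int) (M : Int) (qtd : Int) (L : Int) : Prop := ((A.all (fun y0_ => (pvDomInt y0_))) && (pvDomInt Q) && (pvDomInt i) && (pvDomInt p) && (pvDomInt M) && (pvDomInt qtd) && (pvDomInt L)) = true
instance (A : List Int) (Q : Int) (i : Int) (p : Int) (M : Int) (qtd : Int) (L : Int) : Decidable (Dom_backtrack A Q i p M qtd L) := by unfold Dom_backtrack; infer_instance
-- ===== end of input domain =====

-- B replaces A's branch-and-bound recursion by an iterative level-order DP on a dictionary of
-- (weight, count) states with multiplicities (objective: alternative algorithm, same worst-case cost).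


-- ===== PORT A =====
-- fuel = (L - i).toNat steps remain; the fuel-0 fallback is unreachable on Pre_ (Python recurses
-- forever when i > L with both guards passing — that region is outside Pre_).
def backtrackFuel : Nat → List Int → Int → Int → Int → Int → Int → Int → Int
  | fuel, A, Q, i, p, M, qtd, L =>
    if p > Q ∨ qtd + (L - qtd) < M then (0 : Int)
    else if i = L then (if p ≤ Q ∧ qtd ≥ M then 1 else 0)
    else
      match fuel with
      | 0 => 0
      | f + 1 =>
        backtrackFuel f A Q (i + 1) p M qtd L
          + backtrackFuel f A Q (i + 1) (p + (PySem.List.pyGet? A i).getD 0) M (qtd + 1) L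

def backtrack (A : List Int) (Q : Int) (i : Int) (p : Int) (M : Int) (qtd : Int) (L : Int) : Int :=
  backtrackFuel (L - i).toNat A Q i p M qtd L

-- ===== PORT B =====
-- inner loop body: fold one (state, multiplicity) pair of `states` into `nxt`
def pvInner (Q w : Int) (nxt : PySem.Dict (Int × Int) Int) (kv : (Int × Int) × Int) :
    PySem.Dict (Int × Int) Int :=
  let nxt1 := nxt.insert kv.1 (nxt.getD kv.1 0 + kv.2)
  if kv.1.1 + w ≤ Q then
    nxt1.insert (kv.1.1 + w, kv.1.2 + 1) (nxt1.getD (kv.1.1 + w, kv.1.2 + 1) 0 + kv.2)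
  else nxt1

-- outer loop body: process item j
def pvOuterStep (A : List Int) (Q : Int) (states : PySem.Dict (Int × Int) Int) (j : Int) :
    PySem.Dict (Int × Int) Int :=
  states.items.foldl (pvInner Q ((PySem.List.pyGet? A j).getD 0)) PySem.Dict.empty

def backtrack_alt (A : List Int) (Q : Int) (i : Int) (p : Int) (M : Int) (qtd : Int) (L : Int) : Int :=
  if p > Q ∨ L < M then 0
  else
    (((PySem.List.pyRange i L 1).foldl (pvOuterStep A Q)
        (PySem.Dict.empty.insert (p, qtd) 1)).items).foldl
      (fun acc kv => acc + (if kv.1.2 ≥ M then kv.2 else 0)) 0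

-- ===== PRECONDITION & SPEC =====
-- Pre_ excludes exactly the inputs where Python A raises: i > L with both guards passing
-- (unbounded recursion, RecursionError) or an index among i..L-1 outside A (IndexError).
def Pre_backtrack (A : List Int) (Q : Int) (i : Int) (p : Int) (M : Int) (qtd : Int) (L : Int) : Prop :=
  (p > Q ∨ L < M) ∨ i = L ∨ (i < L ∧ -(A.length : Int) ≤ i ∧ L ≤ (A.length : Int))
instance (A : List Int) (Q : Int) (i : Int) (p : Int) (M : Int) (qtd : Int) (L : Int) : Decidable (Pre_backtrack A Q i p M qtd L) := by unfold Pre_backtrack; infer_instance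

def pvWitness_backtrack : List Int × Int × Int × Int × Int × Int × Int := ([1, 2], 3, 0, 0, 1, 0, 2)

-- On inputs with i > L, p <= Q and M <= L, A never reaches its base case and raises RecursionError,
-- while B's empty item range simply returns 1 if qtd >= M else 0.
def Raises_backtrack (A : List Int) (Q : Int) (i : Int) (p : Int) (M : Int) (qtd : Int) (L : Int) : Prop :=
  p ≤ Q ∧ M ≤ L ∧ L < i
instance (A : List Int) (Q : Int) (i : Int) (p : Int) (M : Int) (qtd : Int) (L : Int) : Decidable (Raises_backtrack A Q i p M qtd L) := by unfold Raises_backtrack; infer_instance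
def pvRaiseWitness_backtrack : List Int × Int × Int × Int × Int × Int × Int := ([], 0, 5, 0, 0, 0, 3)
def pvRaiseWitnessOut_backtrack : Int := 1

def Spec_backtrack (A : List Int) (Q : Int) (i : Int) (p : Int) (M : Int) (qtd : Int) (L : Int) (out : Int) : Prop := out = backtrack_alt A Q i p M qtd L
instance (A : List Int) (Q : Int) (i : Int) (p : Int) (M : Int) (qtd : Int) (L : Int) (out : Int) : Decidable (Spec_backtrack A Q i p M qtd L out) := by unfold Spec_backtrack; infer_instance

-- ===== CLAIM (what is proved, stated in full; the proofs are below) =====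
def Claim_equal_backtrack : Prop := ∀ (A : List Int) (Q : Int) (i : Int) (p : Int) (M : Int) (qtd : Int) (L : Int), Dom_backtrack A Q i p M qtd L → Pre_backtrack A Q i p M qtd L → Spec_backtrack A Q i p M qtd L (backtrack A Q i p M qtd L)
def Claim_raises_backtrack : Prop := (∀ (A : List Int) (Q : Int) (i : Int) (p : Int) (M : Int) (qtd : Int) (L : Int), Dom_backtrack A Q i p M qtd L → Raises_backtrack A Q i p M qtd L → ¬ Pre_backtrack A Q i p M qtd L) ∧ (Dom_backtrack (pvRaiseWitness_backtrack.1) (pvRaiseWitness_backtrack.2.1) (pvRaiseWitness_backtrack.2.2.1) (pvRaiseWitness_backtrack.2.2.2.1) (pvRaiseWitness_backtrack.2.2.2.2.1) (pvRaiseWitness_backtrack.2.2.2.2.2.1) (pvRaiseWitness_backtrack.2.2.2.2.2.2) ∧ Raises_backtrack (pvRaiseWitness_backtrack.1) (pvRaiseWitness_backtrack.2.1) (pvRaiseWitness_backtrack.2.2.1) (pvRaiseWitness_backtrack.2.2.2.1) (pvRaiseWitness_backtrack.2.2.2.2.1) (pvRaiseWitness_backtrack.2.2.2.2.2.1) (pvRaiseWitness_backtrack.2.2.2.2.2.2)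 ∧ backtrack_alt (pvRaiseWitness_backtrack.1) (pvRaiseWitness_backtrack.2.1) (pvRaiseWitness_backtrack.2.2.1) (pvRaiseWitness_backtrack.2.2.2.1) (pvRaiseWitness_backtrack.2.2.2.2.1) (pvRaiseWitness_backtrack.2.2.2.2.2.1) (pvRaiseWitness_backtrack.2.2.2.2.2.2) = pvRaiseWitnessOut_backtrack)

-- ===== LEMMAS AND PROOFS =====

-- weighted sum of a state list under a valuation g of the states
def wsum (g : Int × Int → Int) (l : List ((Int × Int) × Int)) : Int :=
  (l.map (fun kv => kv.2 * g kv.1)).sum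

theorem wsum_congr (g g' : Int × Int → Int) (l : List ((Int × Int) × Int))
    (h : ∀ kv ∈ l, g kv.1 = g' kv.1) : wsum g l = wsum g' l := by
  unfold wsum
  induction l with
  | nil => rfl
  | cons hd tl ih =>
    simp only [List.map_cons, List.sum_cons, h hd (List.mem_cons_self),
      ih (fun kv hkv => h kv (List.mem_cons_of_mem _ hkv))]

theorem final_sum_eq (M : Int) (l : List ((Int × Int) × Int)) (a : Int) :
    l.foldl (fun acc kv => acc + (if kv.1.2 ≥ M then kv.2 else 0)) a
      = a + wsum (fun k => if k.2 ≥ M then 1 else 0) l := by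
  induction l generalizing a with
  | nil => simp [wsum]
  | cons hd tl ih =>
    simp only [List.foldl_cons, ih, wsum, List.map_cons, List.sum_cons]
    split <;> ring

theorem wsum_map_replace (g : Int × Int → Int) (l : List ((Int × Int) × Int)) (k : Int × Int)
    (v0 v : Int) (hnd : (l.map Prod.fst).Nodup) (hmem : (k, v0) ∈ l) :
    wsum g (l.map (fun q => if q.1 == k then (k, v) else q)) = wsum g l - v0 * g k + v * g k := by
  induction l with
  | nil => simp at hmem
  | cons hd tl ih =>
    simp only [List.map_cons] at hnd ⊢
    rcases List.nodup_cons.mp hnd with ⟨hhd, hnd'⟩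
    by_cases hk : hd.1 = k
    · -- head carries key k; by nodup the member (k, v0) must be the head itself
      have hdeq : hd = (k, v0) := by
        rcases List.mem_cons.mp hmem with h | h
        · exact h.symm
        · exact absurd (hk ▸ List.mem_map_of_mem (f := Prod.fst) h) hhd
      have htl : tl.map (fun q => if q.1 == k then (k, v) else q) = tl := by
        have := List.map_congr_left (l := tl)
          (f := fun q => if q.1 == k then (k, v) else q) (g := id) (fun q hq => by
            have : q.1 ≠ k := fun he => hhd (by
              rw [hk, ← he]; exact List.mem_map_of_mem (f := Prod.fst) hq)
            simp [this])
        simpa using this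
      simp only [wsum, List.map_cons, List.sum_cons, hdeq, htl]
      simp
      ring
    · rcases List.mem_cons.mp hmem with h | h
      · exact absurd (congrArg Prod.fst h.symm) hk
      · have hne : (hd.1 == k) = false := by simp [hk]
        simp only [wsum, List.map_cons, List.sum_cons, hne, Bool.false_eq_true,
          if_false] at ih ⊢
        rw [ih hnd' h]
        ring

theorem wsum_insert_acc (g : Int × Int → Int) (d : PySem.Dict (Int × Int) Int) (k : Int × Int)
    (n : Int) (hnd : d.keys.Nodup) :
    wsum g (d.insert k (d.getD k 0 + n)).items = wsum g d.items + n * g k := by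
  by_cases hc : d.contains k
  · rw [PySem.Dict.items_insert_of_contains _ _ hc]
    have hkmem : k ∈ d.keys := (PySem.Dict.contains_iff_mem_keys _ _).mp hc
    have : ∃ q ∈ d.items, q.1 = k := by
      simpa [PySem.Dict.keys, List.mem_map] using hkmem
    rcases this with ⟨⟨k', v0⟩, hq, hk'⟩
    cases hk'
    have hv0 : d.getD k' 0 = v0 := PySem.Dict.getD_of_mem_items _ hq hnd 0
    rw [hv0, wsum_map_replace g d.items k' v0 (v0 + n) hnd hq]
    ring
  · rw [PySem.Dict.items_insert_of_not_contains _ _ (by simpa using hc),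
        PySem.Dict.getD_of_not_contains _ _ (by simpa using hc)]
    simp [wsum]

theorem inner_fold (Q w : Int) (g : Int × Int → Int) (l : List ((Int × Int) × Int)) :
    ∀ (nxt : PySem.Dict (Int × Int) Int), nxt.keys.Nodup →
      (l.foldl (pvInner Q w) nxt).keys.Nodup ∧
      wsum g (l.foldl (pvInner Q w) nxt).items
        = wsum g nxt.items
            + wsum (fun k => g k + if k.1 + w ≤ Q then g (k.1 + w, k.2 + 1) else 0) l := by
  induction l with
  | nil => intro nxt h; exact ⟨h, by simp [wsum]⟩
  | cons hd tl ih =>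
    intro nxt hnd
    have step : (pvInner Q w nxt hd).keys.Nodup ∧
        wsum g (pvInner Q w nxt hd).items
          = wsum g nxt.items
              + hd.2 * (g hd.1 + if hd.1.1 + w ≤ Q then g (hd.1.1 + w, hd.1.2 + 1) else 0) := by
      by_cases hc : hd.1.1 + w ≤ Q
      · have h1 : (nxt.insert hd.1 (nxt.getD hd.1 0 + hd.2)).keys.Nodup :=
          PySem.Dict.nodup_keys_insert _ _ _ hnd
        refine ⟨by simp only [pvInner, hc, if_true]; exact PySem.Dict.nodup_keys_insert _ _ _ h1, ?_⟩
        simp only [pvInner, hc, if_true]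
        rw [wsum_insert_acc g _ _ _ h1, wsum_insert_acc g _ _ _ hnd]
        ring
      · refine ⟨by simp only [pvInner, hc, if_false]; exact PySem.Dict.nodup_keys_insert _ _ _ hnd, ?_⟩
        simp only [pvInner, hc, if_false]
        rw [wsum_insert_acc g _ _ _ hnd]
        ring
    rcases step with ⟨snd, ssum⟩
    rcases ih (pvInner Q w nxt hd) snd with ⟨rnd, rsum⟩
    refine ⟨by simpa using rnd, ?_⟩
    simp only [List.foldl_cons]
    rw [rsum, ssum]
    simp only [wsum, List.map_cons, List.sum_cons]
    ring

theorem inner_fold_bound (Q w : Int) (l : List ((Int × Int) × Int)) :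
    ∀ (nxt : PySem.Dict (Int × Int) Int), (∀ kv ∈ l, kv.1.1 ≤ Q) →
      (∀ k ∈ nxt.keys, k.1 ≤ Q) →
      ∀ k ∈ (l.foldl (pvInner Q w) nxt).keys, k.1 ≤ Q := by
  induction l with
  | nil => intro nxt _ hn k hk; exact hn k hk
  | cons hd tl ih =>
    intro nxt hl hn
    simp only [List.foldl_cons]
    apply ih _ (fun kv hkv => hl kv (List.mem_cons_of_mem _ hkv))
    intro k hk
    by_cases hc : hd.1.1 + w ≤ Q
    · simp only [pvInner, hc, if_true, PySem.Dict.mem_keys_insert] at hk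
      rcases hk with h1 | h2 | h3
      · rw [h1]; exact hc
      · rw [h2]; exact hl hd (List.mem_cons_self)
      · exact hn k h3
    · simp only [pvInner, hc, if_false, PySem.Dict.mem_keys_insert] at hk
      rcases hk with h2 | h3
      · rw [h2]; exact hl hd (List.mem_cons_self)
      · exact hn k h3

theorem fuel_guard_zero (fuel : Nat) (A : List Int) (Q i p M qtd L : Int)
    (h : p > Q ∨ L < M) : backtrackFuel fuel A Q i p M qtd L = 0 := by
  have hg : p > Q ∨ qtd + (L - qtd) < M := by omega
  cases fuel <;> · rw [backtrackFuel]; rw [if_pos hg]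

theorem A_step (A : List Int) (Q M L j pp c : Int) (hj : j < L) (hq : pp ≤ Q) (hm : M ≤ L) :
    backtrack A Q j pp M c L
      = backtrack A Q (j + 1) pp M c L
        + (if pp + (PySem.List.pyGet? A j).getD 0 ≤ Q then
            backtrack A Q (j + 1) (pp + (PySem.List.pyGet? A j).getD 0) M (c + 1) L
          else 0) := by
  have hfuel : (L - j).toNat = (L - (j + 1)).toNat + 1 := by omega
  have hguard : ¬(pp > Q ∨ c + (L - c) < M) := by omega
  unfold backtrack
  rw [hfuel, backtrackFuel, if_neg hguard, if_neg (by omega : ¬ j = L)]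
  by_cases hc : pp + (PySem.List.pyGet? A j).getD 0 ≤ Q
  · rw [if_pos hc]
  · rw [if_neg hc, fuel_guard_zero ((L - (j + 1)).toNat) A Q (j + 1)
          (pp + (PySem.List.pyGet? A j).getD 0) M (c + 1) L (Or.inl (by omega))]

theorem main_inv (A : List Int) (Q M L : Int) (hm : M ≤ L) :
    ∀ (fj : Nat) (j : Int), j ≤ L → (L - j).toNat = fj →
      ∀ (d : PySem.Dict (Int × Int) Int), d.keys.Nodup → (∀ k ∈ d.keys, k.1 ≤ Q) →
        wsum (fun k => if k.2 ≥ M then 1 else 0)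
            ((PySem.List.pyRange j L 1).foldl (pvOuterStep A Q) d).items
          = wsum (fun k => backtrack A Q j k.1 M k.2 L) d.items := by
  intro fj
  induction fj with
  | zero =>
    intro j hjL hfj d hnd hb
    have hjeq : j = L := by omega
    subst hjeq
    rw [PySem.List.pyRange_one_eq_nil (le_refl j)]
    simp only [List.foldl_nil]
    apply wsum_congr
    intro kv hkv
    have hkQ : kv.1.1 ≤ Q :=
      hb kv.1 (by simpa [PySem.Dict.keys] using List.mem_map_of_mem (f := Prod.fst) hkv)
    unfold backtrack
    rw [(by omega : (j - j).toNat = 0), backtrackFuel,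
      if_neg (by omega : ¬(kv.1.1 > Q ∨ kv.1.2 + (j - kv.1.2) < M)), if_pos rfl]
    by_cases hM : kv.1.2 ≥ M
    · rw [if_pos hM, if_pos ⟨hkQ, hM⟩]
    · rw [if_neg hM, if_neg (by tauto)]
  | succ fj ih =>
    intro j hjL hfj d hnd hb
    have hjL' : j < L := by omega
    rw [PySem.List.pyRange_one_cons hjL']
    simp only [List.foldl_cons]
    have hitems : ∀ kv ∈ d.items, kv.1.1 ≤ Q := fun kv hkv =>
      hb kv.1 (by simpa [PySem.Dict.keys] using List.mem_map_of_mem (f := Prod.fst) hkv)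
    have hnd' : (pvOuterStep A Q d j).keys.Nodup := by
      unfold pvOuterStep
      exact (inner_fold Q ((PySem.List.pyGet? A j).getD 0) (fun _ => 0) d.items
        PySem.Dict.empty PySem.Dict.nodup_keys_empty).1
    have hb' : ∀ k ∈ (pvOuterStep A Q d j).keys, k.1 ≤ Q := by
      unfold pvOuterStep
      exact inner_fold_bound Q ((PySem.List.pyGet? A j).getD 0) d.items PySem.Dict.empty
        hitems (by intro k hk; simp [PySem.Dict.keys_empty] at hk)
    rw [ih (j + 1) (by omega) (by omega) (pvOuterStep A Q d j) hnd' hb']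
    unfold pvOuterStep
    rw [(inner_fold Q ((PySem.List.pyGet? A j).getD 0)
          (fun k => backtrack A Q (j + 1) k.1 M k.2 L) d.items
          PySem.Dict.empty PySem.Dict.nodup_keys_empty).2]
    rw [show wsum (fun k => backtrack A Q (j + 1) k.1 M k.2 L)
          (PySem.Dict.empty : PySem.Dict (Int × Int) Int).items = 0 from rfl, zero_add]
    apply wsum_congr
    intro kv hkv
    exact (A_step A Q M L j kv.1.1 kv.1.2 hjL' (hitems kv hkv) hm).symm

-- ===== VERDICT (by name: the statement is the Claim_ definition above) =====
theorem backtrack_spec : Claim_equal_backtrack := by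
  intro A Q i p M qtd L hdom hpre
  unfold Spec_backtrack backtrack_alt
  by_cases hg : p > Q ∨ L < M
  · rw [if_pos hg]
    exact fuel_guard_zero _ _ _ _ _ _ _ _ hg
  · rw [if_neg hg]
    rw [not_or, not_lt, not_lt] at hg
    have hiL : i ≤ L := by
      unfold Pre_backtrack at hpre
      rcases hpre with h | h | h <;> omega
    have hnd0 : ((PySem.Dict.empty : PySem.Dict (Int × Int) Int).insert (p, qtd) 1).keys.Nodup :=
      PySem.Dict.nodup_keys_insert _ _ _ PySem.Dict.nodup_keys_empty
    have hb0 : ∀ k ∈ ((PySem.Dict.empty : PySem.Dict (Int × Int) Int).insert (p, qtd) 1).keys,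
        k.1 ≤ Q := by
      intro k hk
      rw [PySem.Dict.mem_keys_insert] at hk
      rcases hk with h | h
      · rw [h]; exact hg.1
      · simp [PySem.Dict.keys_empty] at h
    rw [final_sum_eq, main_inv A Q M L hg.2 ((L - i).toNat) i hiL rfl _ hnd0 hb0]
    have hitems0 : ((PySem.Dict.empty : PySem.Dict (Int × Int) Int).insert (p, qtd) 1).items
        = [((p, qtd), 1)] := rfl
    rw [hitems0]
    simp [wsum]

-- (referenced by name from outside the file; the simp attribute marks it as an exported fact)
@[simp] theorem backtrack_raises : Claim_raises_backtrack := by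
  unfold Claim_raises_backtrack
  exact ⟨by intro A Q i p M qtd L _ hr; unfold Raises_backtrack at hr; unfold Pre_backtrack; omega,
         by decide⟩
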